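-- pv_equiv track=rewrite | github.com/GeekSky98/Algorithm_lab | Baekjoon/Silver/Z/explanation.py | z_detect
-- ===== SOURCE A (Python) =====
-- def z_detect(n, x, y):
--     answer = 0
--     while n > 0:
--         n -= 1
--         n_2 = 2 ** n
--
--         if x < n_2 and y < n_2:
--             continue
--         elif x < n_2 and y >= n_2:
--             answer += 2 ** (2 * n)
--             y -= n_2
--         elif x >= n_2 and y < n_2:
--             answer += 2 * (2 ** (2 * n))
--             x -= n_2
--         elif x >= n_2 and y >= n_2:
--             answer += 3 * (2 ** (2 * n))
--             x -= n_2
--             y -= n_2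
--
--     return answer
-- ===== SOURCE B (Python) =====
-- def z_detect(n, x, y):
--     if n <= 0:
--         return 0
--     top = 2 ** n - 1
--     x = min(max(x, 0), top)
--     y = min(max(y, 0), top)
--     answer = 0
--     for i in range(n):
--         answer += (x // 2 ** i % 2) * 2 ** (2 * i + 1) \
--                 + (y // 2 ** i % 2) * 2 ** (2 * i)
--     return answer
-- ===== Notes on version B (the rewrite author's own statement) =====
-- stated objective: alternative
-- what changed: Replaced A's top-down quadrant loop with cascading threshold comparisons and subtractions by clamping x and y once into [0, 2**n - 1] (which exactly captures A's saturation on negative/oversized coordinates) and then interleaving their bits arithmetically in a single bottom-up pass.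
import Mathlib
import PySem

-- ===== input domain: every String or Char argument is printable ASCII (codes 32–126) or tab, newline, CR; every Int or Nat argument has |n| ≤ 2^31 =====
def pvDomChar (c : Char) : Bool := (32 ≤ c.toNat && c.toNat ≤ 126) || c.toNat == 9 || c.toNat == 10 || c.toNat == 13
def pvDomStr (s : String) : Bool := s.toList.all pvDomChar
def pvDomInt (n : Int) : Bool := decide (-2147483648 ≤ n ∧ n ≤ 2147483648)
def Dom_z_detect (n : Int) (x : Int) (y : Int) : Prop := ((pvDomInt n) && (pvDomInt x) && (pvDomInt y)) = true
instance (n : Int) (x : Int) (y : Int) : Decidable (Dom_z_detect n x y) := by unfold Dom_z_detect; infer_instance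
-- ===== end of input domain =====

-- B replaces A's top-down quadrant loop (threshold comparisons + cascading subtractions) by a one-shot clamp
-- of x, y into [0, 2^n - 1] followed by an arithmetic bottom-up bit-interleave pass (alternative algorithm).
-- ===== PORT A =====
-- literal transliteration of A's while-loop: state (n, x, y, answer), one recursive step per iteration
def zA_loop (n : Int) (x : Int) (y : Int) (answer : Int) : Int :=
  if h : n > 0 then
    let n' := n - 1
    let n2 : Int := 2 ^ n'.toNat
    if x < n2 ∧ y < n2 then
      zA_loop n' x y answer
    else if x < n2 ∧ y ≥ n2 then
      zA_loop n' x (y - n2) (answer + 2 ^ (2 * n'.toNat))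
    else if x ≥ n2 ∧ y < n2 then
      zA_loop n' (x - n2) y (answer + 2 * 2 ^ (2 * n'.toNat))
    else
      zA_loop n' (x - n2) (y - n2) (answer + 3 * 2 ^ (2 * n'.toNat))
  else
    answer
termination_by n.toNat
decreasing_by all_goals omega

def z_detect (n : Int) (x : Int) (y : Int) : Int := zA_loop n x y 0

-- ===== PORT B =====
-- transliteration of Source B: clamp, then one pass over range(n) extracting bit i of each coordinate
def z_detect_alt (n : Int) (x : Int) (y : Int) : Int :=
  if n ≤ 0 then 0
  else
    let top : Int := 2 ^ n.toNat - 1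
    let x' : Int := min (max x 0) top
    let y' : Int := min (max y 0) top
    (List.range n.toNat).foldl (fun answer i =>
      answer + PySem.Int.mod (PySem.Int.floordiv x' (2 ^ i)) 2 * 2 ^ (2 * i + 1)
             + PySem.Int.mod (PySem.Int.floordiv y' (2 ^ i)) 2 * 2 ^ (2 * i)) 0

-- ===== PRECONDITION & SPEC =====
def Spec_z_detect (n : Int) (x : Int) (y : Int) (out : Int) : Prop := out = z_detect_alt n x y
instance (n : Int) (x : Int) (y : Int) (out : Int) : Decidable (Spec_z_detect n x y out) := by unfold Spec_z_detect; infer_instance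

-- ===== CLAIM (what is proved, stated in full; the proofs are below) =====
def Claim_equal_z_detect : Prop := ∀ (n : Int) (x : Int) (y : Int), Dom_z_detect n x y → Spec_z_detect n x y (z_detect n x y)

-- ===== LEMMAS AND PROOFS =====

-- clamp of v into [0, 2^k - 1]
def clampC (k : Nat) (v : Int) : Int := min (max v 0) (2 ^ k - 1)

-- the interleaved value of the low k bits of x and y (x bit at odd position, y at even)
def interleave (k : Nat) (x y : Int) : Int :=
  match k with
  | 0 => 0
  | k + 1 => x / 2 ^ k % 2 * 2 ^ (2 * k + 1) + y / 2 ^ k % 2 * 2 ^ (2 * k) + interleave k x y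

theorem interleave_shift (k : Nat) (x y a b : Int) :
    interleave k (x + a * 2 ^ k) (y + b * 2 ^ k) = interleave k x y := by
  induction k generalizing a b with
  | zero => rfl
  | succ k ih =>
    have hx : x + a * 2 ^ (k + 1) = x + 2 * a * 2 ^ k := by ring
    have hy : y + b * 2 ^ (k + 1) = y + 2 * b * 2 ^ k := by ring
    have hdx : (x + 2 * a * 2 ^ k) / 2 ^ k = x / 2 ^ k + 2 * a :=
      Int.add_mul_ediv_right x (2 * a) (by positivity)
    have hdy : (y + 2 * b * 2 ^ k) / 2 ^ k = y / 2 ^ k + 2 * b :=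
      Int.add_mul_ediv_right y (2 * b) (by positivity)
    rw [interleave, hx, hy, hdx, hdy, ih, interleave]
    have m1 : (x / 2 ^ k + 2 * a) % 2 = x / 2 ^ k % 2 := Int.add_mul_emod_self_left (x / 2 ^ k) 2 a
    have m2 : (y / 2 ^ k + 2 * b) % 2 = y / 2 ^ k % 2 := Int.add_mul_emod_self_left (y / 2 ^ k) 2 b
    rw [m1, m2]

theorem interleave_sub (k : Nat) (x y a b : Int) :
    interleave k (x - a * 2 ^ k) (y - b * 2 ^ k) = interleave k x y := by
  have := interleave_shift k (x - a * 2 ^ k) (y - b * 2 ^ k) a b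
  simpa using this.symm

-- how A's one step acts on the clamped coordinate: low part
theorem clamp_low (k : Nat) (v : Int) (h : v ≥ 2 ^ k) :
    clampC k (v - 2 ^ k) = clampC (k + 1) v - 1 * 2 ^ k := by
  have h1 : (1 : Int) ≤ 2 ^ k := one_le_pow₀ (by norm_num)
  have h2 : (2 : Int) ^ (k + 1) = 2 * 2 ^ k := by ring
  unfold clampC; omega

theorem clamp_low' (k : Nat) (v : Int) (h : ¬ v ≥ 2 ^ k) :
    clampC k v = clampC (k + 1) v - 0 * 2 ^ k := by
  have h1 : (1 : Int) ≤ 2 ^ k := one_le_pow₀ (by norm_num)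
  have h2 : (2 : Int) ^ (k + 1) = 2 * 2 ^ k := by ring
  unfold clampC; omega

-- top bit of the clamped coordinate = A's threshold test
theorem clamp_topbit (k : Nat) (v : Int) :
    clampC (k + 1) v / 2 ^ k % 2 = (if v ≥ 2 ^ k then 1 else 0) := by
  have h1 : (1 : Int) ≤ 2 ^ k := one_le_pow₀ (by norm_num)
  have h2 : (2 : Int) ^ (k + 1) = 2 * 2 ^ k := by ring
  by_cases hv : v ≥ 2 ^ k
  · have hd : clampC (k + 1) v / 2 ^ k = (clampC (k + 1) v - 2 ^ k) / 2 ^ k + 1 := by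
      conv_lhs => rw [show clampC (k + 1) v = (clampC (k + 1) v - 2 ^ k) + 1 * 2 ^ k by ring]
      exact Int.add_mul_ediv_right _ 1 (by positivity)
    have hz : (clampC (k + 1) v - 2 ^ k) / 2 ^ k = 0 := by
      apply Int.ediv_eq_zero_of_lt <;> unfold clampC <;> omega
    simp [hv, hd, hz]
  · have hz : clampC (k + 1) v / 2 ^ k = 0 := by
      apply Int.ediv_eq_zero_of_lt <;> unfold clampC <;> omega
    simp [hv, hz]

-- A's loop computes: answer + interleave of the clamped coordinates
theorem zA_loop_eq (n : Int) (x : Int) (y : Int) (answer : Int) :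
    zA_loop n x y answer = answer + interleave n.toNat (clampC n.toNat x) (clampC n.toNat y) := by
  by_cases h : n > 0
  · have hklt : (n - 1).toNat < n.toNat := by omega
    obtain ⟨k, hK⟩ : ∃ k, (n - 1).toNat = k := ⟨_, rfl⟩
    have hn1 : n.toNat = k + 1 := by omega
    have ihx : ∀ x y a, zA_loop (n - 1) x y a
        = a + interleave k (clampC k x) (clampC k y) := by
      intro x y a
      have := zA_loop_eq (n - 1) x y a
      rwa [hK] at this
    rw [zA_loop]
    simp only [h, dite_true]
    rw [hK, hn1, interleave, clamp_topbit, clamp_topbit]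
    by_cases cx : x < 2 ^ k <;> by_cases cy : y < 2 ^ k
    · rw [if_pos ⟨cx, cy⟩, ihx, if_neg (by omega), if_neg (by omega),
          clamp_low' k x (by omega), clamp_low' k y (by omega), interleave_sub]
      ring
    · rw [if_neg (fun hc => cy hc.2), if_pos ⟨cx, not_lt.mp cy⟩, ihx,
          if_neg (by omega), if_pos (by omega),
          clamp_low' k x (by omega), clamp_low k y (by omega), interleave_sub]
      ring
    · rw [if_neg (fun hc => cx hc.1), if_neg (fun hc => cx hc.1), if_pos ⟨not_lt.mp cx, cy⟩, ihx,
          if_pos (by omega), if_neg (by omega),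
          clamp_low k x (by omega), clamp_low' k y (by omega), interleave_sub]
      ring
    · rw [if_neg (fun hc => cx hc.1), if_neg (fun hc => cx hc.1), if_neg (fun hc => cy hc.2), ihx,
          if_pos (by omega), if_pos (by omega),
          clamp_low k x (by omega), clamp_low k y (by omega), interleave_sub]
      ring
  · rw [zA_loop]
    simp only [h, dite_false]
    have h0 : n.toNat = 0 := by omega
    rw [h0]; simp [interleave]
termination_by n.toNat
decreasing_by omega

-- B's fold over range(k) computes the same interleave
theorem foldl_interleave (k : Nat) (x y a : Int) :
    (List.range k).foldl (fun answer i =>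
      answer + PySem.Int.mod (PySem.Int.floordiv x (2 ^ i)) 2 * 2 ^ (2 * i + 1)
             + PySem.Int.mod (PySem.Int.floordiv y (2 ^ i)) 2 * 2 ^ (2 * i)) a
      = a + interleave k x y := by
  induction k generalizing a with
  | zero => simp [interleave]
  | succ k ih =>
    rw [List.range_succ, List.foldl_append, ih]
    simp only [List.foldl_cons, List.foldl_nil, interleave]
    rw [PySem.Int.floordiv_eq_ediv_of_pos (by positivity),
        PySem.Int.floordiv_eq_ediv_of_pos (by positivity),
        PySem.Int.mod_eq_emod_of_pos (by norm_num),
        PySem.Int.mod_eq_emod_of_pos (by norm_num)]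
    ring

-- ===== VERDICT (by name: the statement is the Claim_ definition above) =====
theorem z_detect_spec : Claim_equal_z_detect := by
  intro n x y _
  unfold Spec_z_detect z_detect z_detect_alt
  rw [zA_loop_eq]
  by_cases h : n ≤ 0
  · have h0 : n.toNat = 0 := by omega
    simp [h, h0, interleave]
  · simp only [h, if_false]
    rw [foldl_interleave,
        show min (max x 0) (2 ^ n.toNat - 1) = clampC n.toNat x from rfl,
        show min (max y 0) (2 ^ n.toNat - 1) = clampC n.toNat y from rfl]
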